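-- pv_equiv track=rewrite | github.com/Raffson/Sub-C-compiler | subCListener2.py | __buildDeclType
-- ===== SOURCE A (Python) =====
-- types = [u"void", u"char", u"int", u"float", u"const", u"*"]
--
-- def __buildDeclType(dtype, string):
--     index = 0
--     typelen = 0
--     string = string.split('=',1)[0]
--     for t in types:
--         temp = string.rfind(t)
--         if( temp >= index ):
--             index = temp
--             typelen = len(t)
--     if( index == 0 or typelen == 0 ):
--         #generate error? or is the error caught in an earlier stage?
--         pass
--     dtype += string[:index+typelen]
--     return dtype
-- ===== SOURCE B (Python) =====
-- types = [u"void", u"char", u"int", u"float", u"const", u"*"]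
--
-- def __buildDeclType(dtype, string):
--     # single left-to-right scan keeping the last position where any type keyword starts
--     s = string.split('=', 1)[0]
--     best = None
--     for i in range(len(s)):
--         for t in types:
--             if s.startswith(t, i):
--                 best = (i, len(t))
--     if best is None:
--         return dtype
--     i, l = best
--     return dtype + s[:i + l]
-- ===== Notes on version B (the rewrite author's own statement) =====
-- stated objective: alternative
-- what changed: Replaces A's six separate rfind passes (one per type keyword, keeping the max index) by a single left-to-right scan over positions that records the last position where any keyword starts.
import Mathlib
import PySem

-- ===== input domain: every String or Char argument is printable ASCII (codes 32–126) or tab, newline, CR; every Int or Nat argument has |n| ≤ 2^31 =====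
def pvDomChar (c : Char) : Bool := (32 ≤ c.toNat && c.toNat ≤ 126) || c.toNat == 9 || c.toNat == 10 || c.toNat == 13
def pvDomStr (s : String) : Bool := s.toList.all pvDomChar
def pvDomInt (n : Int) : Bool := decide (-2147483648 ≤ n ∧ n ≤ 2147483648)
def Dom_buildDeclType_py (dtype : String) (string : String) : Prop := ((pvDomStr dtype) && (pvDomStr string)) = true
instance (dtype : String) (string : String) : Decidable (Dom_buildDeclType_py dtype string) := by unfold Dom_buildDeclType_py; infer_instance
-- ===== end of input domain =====

-- B replaces A's six rfind passes (one per type keyword) by a single left-to-right scan over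
-- positions that keeps the last position where any type keyword starts (objective: alternative).

-- ===== PORT A =====
-- the module-level constant `types = ["void", "char", "int", "float", "const", "*"]`
def pvTypes : List (List Char) :=
  [['v','o','i','d'], ['c','h','a','r'], ['i','n','t'], ['f','l','o','a','t'], ['c','o','n','s','t'], ['*']]

def buildDeclType_py (dtype : String) (string : String) : String :=
  -- string = string.split('=', 1)[0]  (split with a nonempty separator returns ≥ 1 piece, so [0] is the head)
  let s : List Char := ((PySem.Chars.splitMax? string.toList ['='] 1).getD []).headD []
  -- index = 0; typelen = 0; for t in types: temp = string.rfind(t); if temp >= index: index = temp; typelen = len(t)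
  let st : Int × Int := pvTypes.foldl (fun p t =>
      let temp := PySem.Chars.rfind s t
      if p.1 ≤ temp then (temp, (t.length : Int)) else p) (0, 0)
  -- dtype += string[:index+typelen]; return dtype
  String.ofList (dtype.toList ++ PySem.Chars.slice s none (some (st.1 + st.2)))

-- ===== PORT B =====
def buildDeclType_py_alt (dtype : String) (string : String) : String :=
  -- s = string.split('=', 1)[0]
  let s : List Char := ((PySem.Chars.splitMax? string.toList ['='] 1).getD []).headD []
  -- best = None; for i in range(len(s)): for t in types: if s.startswith(t, i): best = (i, len(t))
  -- (range(len(s)) yields the naturals 0..len(s)-1; s.startswith(t, i) with 0 ≤ i ≤ len(s) tests t at s[i:])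
  let best : Option (Nat × Nat) := (List.range s.length).foldl (fun acc i =>
      pvTypes.foldl (fun a t =>
        if PySem.Chars.startswith (s.drop i) t then some (i, t.length) else a) acc) none
  -- if best is None: return dtype; i, l = best; return dtype + s[:i+l]  (0 ≤ i+l, a plain take)
  match best with
  | none => dtype
  | some (i, l) => String.ofList (dtype.toList ++ s.take (i + l))

-- ===== PRECONDITION & SPEC =====
def Spec_buildDeclType_py (dtype : String) (string : String) (out : String) : Prop := out = buildDeclType_py_alt dtype string
instance (dtype : String) (string : String) (out : String) : Decidable (Spec_buildDeclType_py dtype string out) := by unfold Spec_buildDeclType_py; infer_instance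

-- ===== CLAIM (what is proved, stated in full; the proofs are below) =====
def Claim_equal_buildDeclType_py : Prop := ∀ (dtype : String) (string : String), Dom_buildDeclType_py dtype string → Spec_buildDeclType_py dtype string (buildDeclType_py dtype string)

-- ===== LEMMAS AND PROOFS =====

-- `t` starts at position `i` of `s`
def pvP (s t : List Char) (i : Nat) : Bool := t.isPrefixOf (s.drop i)

-- length of the LAST type keyword starting at position `i` (B's inner loop, projected to the length)
def pvM (s : List Char) (i : Nat) : Option Nat :=
  pvTypes.foldl (fun a t => if pvP s t i then some t.length else a) none

-- B's outer loop over the first `n` positions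
def pvB (s : List Char) (n : Nat) : Option (Nat × Nat) :=
  (List.range n).foldl (fun acc i =>
    pvTypes.foldl (fun a t => if pvP s t i then some (i, t.length) else a) acc) none

lemma pvStart (s t : List Char) (i : Nat) :
    PySem.Chars.startswith (s.drop i) t = pvP s t i := by
  simp [PySem.Chars.startswith, pvP]

lemma pvQ (s : List Char) :
    (List.range s.length).foldl (fun acc i =>
      pvTypes.foldl (fun a t => if pvP s t i then some (i, t.length) else a) acc) none
    = pvB s s.length := rfl

-- last-write fold: a general accumulator factors out
lemma pvM_acc (s : List Char) (i : Nat) :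
    ∀ (ts : List (List Char)) (a : Option Nat),
      ts.foldl (fun a t => if pvP s t i then some t.length else a) a
        = (ts.foldl (fun a t => if pvP s t i then some t.length else a) none).or a := by
  intro ts
  induction ts with
  | nil => intro a; simp
  | cons t ts ih =>
    intro a
    simp only [List.foldl_cons]
    rw [ih (if pvP s t i then some t.length else a),
        ih (if pvP s t i then some t.length else none)]
    cases h : pvP s t i <;>
      cases hf : ts.foldl (fun a t => if pvP s t i then some t.length else a) none <;>
      simp [Option.or]

lemma pvM_none_iff (s : List Char) (i : Nat) :
    ∀ ts : List (List Char),
      ts.foldl (fun a t => if pvP s t i then some t.length else a) none = none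
        ↔ ∀ t ∈ ts, pvP s t i = false := by
  intro ts
  induction ts with
  | nil => simp
  | cons t ts ih =>
    simp only [List.foldl_cons]
    rw [pvM_acc s i ts (if pvP s t i then some t.length else none)]
    cases h : pvP s t i <;>
      cases hf : ts.foldl (fun a t => if pvP s t i then some t.length else a) none <;>
      simp_all [Option.or]

-- B's inner loop, with the pairing factored through pvM
lemma pvG (s : List Char) (i : Nat) :
    ∀ (ts : List (List Char)) (acc : Option (Nat × Nat)),
      ts.foldl (fun a t => if pvP s t i then some (i, t.length) else a) acc
        = ((ts.foldl (fun a t => if pvP s t i then some t.length else a) none).map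
            (fun l => (i, l))).or acc := by
  intro ts
  induction ts with
  | nil => intro acc; simp
  | cons t ts ih =>
    intro acc
    simp only [List.foldl_cons]
    rw [ih (if pvP s t i then some (i, t.length) else acc),
        pvM_acc s i ts (if pvP s t i then some t.length else none)]
    cases h : pvP s t i <;>
      cases hf : ts.foldl (fun a t => if pvP s t i then some t.length else a) none <;>
      simp [Option.or]

lemma pvB_succ (s : List Char) (n : Nat) :
    pvB s (n + 1) = ((pvM s n).map (fun l => (n, l))).or (pvB s n) := by
  unfold pvB pvM
  rw [List.range_succ, List.foldl_append]
  simp only [List.foldl_cons, List.foldl_nil]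
  exact pvG s n pvTypes _

lemma pvB_spec (s : List Char) :
    ∀ n : Nat,
      (pvB s n = none ∧ ∀ i < n, pvM s i = none)
      ∨ (∃ i l, i < n ∧ pvB s n = some (i, l) ∧ pvM s i = some l ∧
          ∀ j, i < j → j < n → pvM s j = none) := by
  intro n
  induction n with
  | zero => left; simp [pvB]
  | succ n ih =>
    rw [pvB_succ]
    cases h : pvM s n with
    | none =>
      simp only [Option.map_none, Option.none_or]
      rcases ih with ⟨h1, h2⟩ | ⟨i, l, hi, h1, h2, h3⟩
      · left
        refine ⟨h1, fun i hi => ?_⟩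
        rcases Nat.lt_succ_iff_lt_or_eq.mp hi with hi | rfl
        · exact h2 i hi
        · exact h
      · right
        refine ⟨i, l, Nat.lt_succ_of_lt hi, h1, h2, fun j hj1 hj2 => ?_⟩
        rcases Nat.lt_succ_iff_lt_or_eq.mp hj2 with hj | rfl
        · exact h3 j hj1 hj
        · exact h
    | some l =>
      right
      exact ⟨n, l, Nat.lt_succ_self n, by simp [Option.or], h,
        fun j hj1 hj2 => absurd hj1 (by omega)⟩

-- no keyword is nonempty at or past the end of s
lemma pvP_ge (s t : List Char) (ht : t ≠ []) {i : Nat} (h : s.length ≤ i) :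
    pvP s t i = false := by
  unfold pvP
  rw [List.drop_eq_nil_of_le h]
  cases t with
  | nil => exact absurd rfl ht
  | cons c cs => simp [List.isPrefixOf]

lemma pvGo_spec (s t : List Char) :
    ∀ j : Nat,
      (PySem.Chars.rfind.go s t j = -1 ∧ ∀ i ≤ j, pvP s t i = false)
      ∨ (∃ m : Nat, m ≤ j ∧ PySem.Chars.rfind.go s t j = (m : Int) ∧ pvP s t m = true ∧
          ∀ i ≤ j, m < i → pvP s t i = false) := by
  intro j
  induction j with
  | zero =>
    cases h : t.isPrefixOf s with
    | true =>
      right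
      exact ⟨0, le_refl 0, by simp [PySem.Chars.rfind.go, h], by simpa [pvP] using h,
        fun i hi hi' => absurd hi (by omega)⟩
    | false =>
      left
      refine ⟨by simp [PySem.Chars.rfind.go, h], fun i hi => ?_⟩
      interval_cases i
      simpa [pvP] using h
  | succ j ih =>
    cases h : t.isPrefixOf (s.drop (j + 1)) with
    | true =>
      right
      exact ⟨j + 1, le_refl _, by simp [PySem.Chars.rfind.go, h], by simpa [pvP] using h,
        fun i hi hi' => absurd hi (by omega)⟩
    | false =>
      have hgo : PySem.Chars.rfind.go s t (j + 1) = PySem.Chars.rfind.go s t j := by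
        simp [PySem.Chars.rfind.go, h]
      rcases ih with ⟨h1, h2⟩ | ⟨m, hm, h1, h2, h3⟩
      · left
        refine ⟨hgo ▸ h1, fun i hi => ?_⟩
        rcases Nat.lt_succ_iff_lt_or_eq.mp (Nat.lt_succ_of_le hi) with hi' | rfl
        · exact h2 i (by omega)
        · simpa [pvP] using h
      · right
        refine ⟨m, Nat.le_succ_of_le hm, hgo ▸ h1, h2, fun i hi hi' => ?_⟩
        rcases Nat.lt_succ_iff_lt_or_eq.mp (Nat.lt_succ_of_le hi) with hi'' | rfl
        · exact h3 i (by omega) hi'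
        · simpa [pvP] using h

lemma pvRfind_spec (s t : List Char) (ht : t ≠ []) :
    (PySem.Chars.rfind s t = -1 ∧ ∀ i, pvP s t i = false)
    ∨ (∃ m : Nat, m < s.length ∧ PySem.Chars.rfind s t = (m : Int) ∧ pvP s t m = true ∧
        ∀ i, m < i → pvP s t i = false) := by
  have hr : PySem.Chars.rfind s t = PySem.Chars.rfind.go s t s.length := rfl
  rcases pvGo_spec s t s.length with ⟨h1, h2⟩ | ⟨m, hm, h1, h2, h3⟩
  · left
    refine ⟨hr ▸ h1, fun i => ?_⟩
    by_cases hi : i ≤ s.length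
    · exact h2 i hi
    · exact pvP_ge s t ht (by omega)
  · right
    have hmlt : m < s.length := by
      rcases Nat.lt_or_ge m s.length with h | h
      · exact h
      · exact absurd h2 (by simp [pvP_ge s t ht h])
    refine ⟨m, hmlt, hr ▸ h1, h2, fun i hi => ?_⟩
    by_cases hile : i ≤ s.length
    · exact h3 i hile hi
    · exact pvP_ge s t ht (by omega)

-- every type keyword is nonempty
lemma pvTypes_ne (t : List Char) (ht : t ∈ pvTypes) : t ≠ [] := by
  fin_cases ht <;> simp

-- A's loop when no keyword occurs anywhere: the state stays (0, 0)
lemma pvA_none (s : List Char) :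
    ∀ ts : List (List Char), (∀ t ∈ ts, PySem.Chars.rfind s t = -1) →
      ts.foldl (fun p t =>
        let temp := PySem.Chars.rfind s t
        if p.1 ≤ temp then (temp, (t.length : Int)) else p) ((0 : Int), (0 : Int))
      = ((0 : Int), (0 : Int)) := by
  intro ts
  induction ts with
  | nil => intro _; rfl
  | cons t ts ih =>
    intro h
    simp only [List.foldl_cons]
    rw [show (let temp := PySem.Chars.rfind s t;
          if ((0 : Int), (0 : Int)).1 ≤ temp then (temp, (t.length : Int)) else ((0 : Int), (0 : Int)))
        = ((0 : Int), (0 : Int)) by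
      simp only [h t (by simp)]; norm_num]
    exact ih (fun u hu => h u (by simp [hu]))

-- A's loop invariant against B's inner loop at the winning position i:
-- if every keyword matching at i has rfind = i and every other keyword has rfind < i,
-- then A's state tracks (i, last matching length).
lemma pvA_inv (s : List Char) (i : Nat) :
    ∀ (ts : List (List Char)) (p : Int × Int) (a : Option Nat),
      (∀ t ∈ ts, (pvP s t i = true → PySem.Chars.rfind s t = (i : Int)) ∧
        (pvP s t i = false → PySem.Chars.rfind s t < (i : Int))) →
      p.1 ≤ (i : Int) →
      (∀ L : Nat, a = some L → p = ((i : Int), (L : Int))) →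
      (ts.foldl (fun p t =>
          let temp := PySem.Chars.rfind s t
          if p.1 ≤ temp then (temp, (t.length : Int)) else p) p).1 ≤ (i : Int)
      ∧ ∀ L : Nat,
          ts.foldl (fun a t => if pvP s t i then some t.length else a) a = some L →
          ts.foldl (fun p t =>
            let temp := PySem.Chars.rfind s t
            if p.1 ≤ temp then (temp, (t.length : Int)) else p) p = ((i : Int), (L : Int)) := by
  intro ts
  induction ts with
  | nil =>
    intro p a _ hp ha
    exact ⟨hp, fun L hL => ha L hL⟩
  | cons t ts ih =>
    intro p a H hp ha
    have Ht := H t (by simp)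
    simp only [List.foldl_cons]
    cases hpt : pvP s t i with
    | true =>
      have hr : PySem.Chars.rfind s t = (i : Int) := Ht.1 hpt
      have hstep : (let temp := PySem.Chars.rfind s t;
          if p.1 ≤ temp then (temp, (t.length : Int)) else p) = ((i : Int), (t.length : Int)) := by
        simp only [hr, if_pos hp]
      rw [hstep, if_pos rfl]
      exact ih ((i : Int), (t.length : Int)) (some t.length)
        (fun u hu => H u (by simp [hu])) (le_refl _)
        (fun L hL => by simp at hL; simp [hL])
    | false =>
      have hr : PySem.Chars.rfind s t < (i : Int) := Ht.2 hpt
      rw [if_neg (by decide : ¬ (false = true))]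
      by_cases hc : p.1 ≤ PySem.Chars.rfind s t
      · have hstep : (let temp := PySem.Chars.rfind s t;
            if p.1 ≤ temp then (temp, (t.length : Int)) else p)
            = (PySem.Chars.rfind s t, (t.length : Int)) := by
          simp only [if_pos hc]
        rw [hstep]
        refine ih _ a (fun u hu => H u (by simp [hu])) (le_of_lt hr) (fun L hL => ?_)
        rw [ha L hL] at hc
        simp only [] at hc
        exact absurd hc (by simp; omega)
      · have hstep : (let temp := PySem.Chars.rfind s t;
            if p.1 ≤ temp then (temp, (t.length : Int)) else p) = p := by
          simp only [if_neg hc]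
        rw [hstep]
        exact ih p a (fun u hu => H u (by simp [hu])) hp ha

-- ===== VERDICT (by name: the statement is the Claim_ definition above) =====
theorem buildDeclType_py_spec : Claim_equal_buildDeclType_py := by
  intro dtype string _
  unfold Spec_buildDeclType_py buildDeclType_py buildDeclType_py_alt
  set s : List Char := ((PySem.Chars.splitMax? string.toList ['='] 1).getD []).headD [] with hs
  clear hs
  simp only [pvStart, pvQ]
  rcases pvB_spec s s.length with ⟨hB, hnone⟩ | ⟨i, l, hilt, hB, hMi, hmax⟩
  · -- no keyword occurs anywhere: A's state is (0,0), B returns dtype unchanged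
    have hall : ∀ t ∈ pvTypes, PySem.Chars.rfind s t = -1 := by
      intro t ht
      rcases pvRfind_spec s t (pvTypes_ne t ht) with ⟨h1, _⟩ | ⟨m, hmlt, _, h2, _⟩
      · exact h1
      · exact absurd h2 (by
          simp [(pvM_none_iff s m pvTypes).mp (hnone m hmlt) t ht])
    rw [pvA_none s pvTypes hall, hB]
    have : PySem.Chars.slice s none (some ((0 : Int) + (0 : Int))) = [] := by
      norm_num
      simp [PySem.List.slice_to (xs := s) (b := 0) (by norm_num)]
    rw [this]
    simp
  · -- keyword(s) occur; i is the last position with a hit, l the last matching length there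
    have H : ∀ t ∈ pvTypes, (pvP s t i = true → PySem.Chars.rfind s t = (i : Int)) ∧
        (pvP s t i = false → PySem.Chars.rfind s t < (i : Int)) := by
      intro t ht
      have hne := pvTypes_ne t ht
      constructor
      · intro hpt
        rcases pvRfind_spec s t hne with ⟨_, h2⟩ | ⟨m, hmlt, h1, h2, h3⟩
        · exact absurd hpt (by simp [h2 i])
        · have him : i ≤ m := by
            by_contra hlt
            exact absurd hpt (by simp [h3 i (by omega)])
          have hmi : m ≤ i := by
            by_contra hlt
            have hMm := (pvM_none_iff s m pvTypes).mp (hmax m (by omega) hmlt) t ht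
            exact absurd h2 (by simp [hMm])
          have : m = i := le_antisymm hmi him
          rw [h1, this]
      · intro hpt
        rcases pvRfind_spec s t hne with ⟨h1, _⟩ | ⟨m, hmlt, h1, h2, h3⟩
        · rw [h1]; omega
        · have hmi : m < i := by
            rcases Nat.lt_trichotomy m i with h | h | h
            · exact h
            · subst h; exact absurd h2 (by simp [hpt])
            · have hMm := (pvM_none_iff s m pvTypes).mp (hmax m h hmlt) t ht
              exact absurd h2 (by simp [hMm])
          rw [h1]
          exact_mod_cast hmi
    have hA := (pvA_inv s i pvTypes ((0 : Int), (0 : Int)) none H (by positivity)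
      (fun L hL => by simp at hL)).2 l hMi
    rw [hA, hB]
    have hslice : PySem.Chars.slice s none (some ((i : Int) + (l : Int))) = s.take (i + l) := by
      have hc : ((i : Int) + (l : Int)) = ((i + l : Nat) : Int) := by push_cast; ring
      simp only [PySem.Chars.slice_eq_listSlice]
      rw [hc, PySem.List.slice_to_natCast]
    rw [hslice]
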